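-- pv_equiv track=rewrite | github.com/it4discovery/wumpus-world | wumpusWorld/train.py | getMoveCount
-- ===== SOURCE A (Python) =====
-- def getMoveCount(moves):
--   sequence = 1
--   reversed_moves = moves[::-1]
--   for index, move in enumerate(reversed_moves):
--       if index + 1 == len(reversed_moves):
--           break
--       if sequence == 10:
--           break
--       if(move == reversed_moves[index + 1]):
--           sequence += 1
--       else:
--           break
--   return sequence
-- ===== SOURCE B (Python) =====
-- def getMoveCount(moves):
--     # forward run-length grouping: lengths of consecutive-equal groups, front to back
--     lengths = []
--     i = 0
--     total = len(moves)
--     while i < total: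
--         x = moves[i]
--         n = 1
--         i += 1
--         while i < total and moves[i] == x:
--             n += 1
--             i += 1
--         lengths.append(n)
--     if not lengths:
--         return 1
--     return min(lengths[-1], 10)
-- ===== Notes on version B (the rewrite author's own statement) =====
-- stated objective: alternative
-- what changed: Replaces A's backward early-breaking adjacent-comparison scan over the reversed list with a forward run-length grouping pass over the original list, then takes the last group length and caps it with min(.,10).
import Mathlib
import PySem

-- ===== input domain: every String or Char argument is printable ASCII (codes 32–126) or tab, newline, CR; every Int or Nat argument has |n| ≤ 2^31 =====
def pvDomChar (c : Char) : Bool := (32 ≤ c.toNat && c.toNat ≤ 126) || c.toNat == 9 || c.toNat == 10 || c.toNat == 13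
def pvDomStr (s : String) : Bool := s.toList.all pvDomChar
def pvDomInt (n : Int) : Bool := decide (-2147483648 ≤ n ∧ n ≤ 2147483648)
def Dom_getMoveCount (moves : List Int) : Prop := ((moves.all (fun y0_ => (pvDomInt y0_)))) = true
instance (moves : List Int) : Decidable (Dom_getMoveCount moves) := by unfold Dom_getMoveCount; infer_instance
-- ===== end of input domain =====

-- B replaces A's backward early-breaking adjacent scan by a forward run-length grouping
-- pass whose last group length is capped with min (objective: alternative, same cost).


-- ===== PORT A =====
-- the for-loop over enumerate(reversed_moves): current element plus lookahead
-- reversed_moves[index+1]; the two breaks (last index, sequence == 10) return sequence.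
def getMoveCountLoop (seq : Int) : List Int → Int
  | [] => seq                      -- loop body never runs
  | [_] => seq                     -- index + 1 == len(reversed_moves): break
  | x :: y :: rest =>
    if seq = 10 then seq           -- sequence == 10: break
    else if x = y then getMoveCountLoop (seq + 1) (y :: rest)
    else seq                       -- break

def getMoveCount (moves : List Int) : Int :=
  -- moves[::-1]; exact by PySem.List.slice?_none_none_neg_one
  let reversedMoves := (PySem.List.slice? moves none none (-1)).getD []
  getMoveCountLoop 1 reversedMoves

-- ===== PORT B =====
mutual
-- B's outer while loop: each step emits the length of one run; the remaining suffix
-- moves[i:] is the list argument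
def groupLengths : List Int → List Int
  | [] => []
  | x :: rest => groupGo x 1 rest
termination_by l => 2 * l.length
-- B's inner while loop: n counts the copies of x at the front of the remaining suffix
def groupGo (x : Int) (n : Int) : List Int → List Int
  | [] => [n]
  | y :: ys => if y = x then groupGo x (n + 1) ys else n :: groupLengths (y :: ys)
termination_by l => 2 * l.length + 1
end

def getMoveCount_alt (moves : List Int) : Int :=
  let lengths := groupLengths moves
  match lengths.getLast? with   -- lengths[-1] (empty ⇒ the 'if not lengths' branch)
  | none => 1
  | some g => min g 10

-- ===== PRECONDITION & SPEC =====
def Spec_getMoveCount (moves : List Int) (out : Int) : Prop := out = getMoveCount_alt moves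
instance (moves : List Int) (out : Int) : Decidable (Spec_getMoveCount moves out) := by unfold Spec_getMoveCount; infer_instance

-- ===== CLAIM (what is proved, stated in full; the proofs are below) =====
def Claim_equal_getMoveCount : Prop := ∀ (moves : List Int), Dom_getMoveCount moves → Spec_getMoveCount moves (getMoveCount moves)

-- ===== LEMMAS AND PROOFS =====

-- length of the chain of consecutive equal elements continuing x
def chainLen : Int → List Int → Int
  | _, [] => 0
  | x, y :: ys => if y = x then chainLen y ys + 1 else 0

-- trailing-run length, by forward recursion
def tc : List Int → Int
  | [] => 0
  | y :: ys => if ys.all (· = y) then 1 + (ys.length : Int) else tc ys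

theorem chainLen_nonneg (xs : List Int) : ∀ (x : Int), 0 ≤ chainLen x xs := by
  induction xs with
  | nil => intro x; simp [chainLen]
  | cons y ys ih =>
    intro x
    simp only [chainLen]
    split_ifs with h
    · have := ih y; omega
    · omega

theorem loopA_eq (xs : List Int) : ∀ (x seq : Int), seq ≤ 10 →
    getMoveCountLoop seq (x :: xs) = min (seq + chainLen x xs) 10 := by
  induction xs with
  | nil => intro x seq h; simp only [getMoveCountLoop, chainLen]; omega
  | cons y ys ih =>
    intro x seq h
    simp only [getMoveCountLoop, chainLen]
    by_cases h10 : seq = 10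
    · subst h10
      rw [if_pos rfl]
      split_ifs with hyx
      · have := chainLen_nonneg ys y; omega
      · omega
    · rw [if_neg h10]
      by_cases hyx : y = x
      · rw [if_pos hyx, if_pos hyx.symm, ih y (seq + 1) (by omega)]
        subst hyx
        omega
      · rw [if_neg hyx, if_neg (fun h' => hyx h'.symm)]
        omega

theorem chainLen_append (xs : List Int) : ∀ (x y : Int),
    chainLen x (xs ++ [y]) = if xs.all (· = x) ∧ y = x then (xs.length : Int) + 1 else chainLen x xs := by
  induction xs with
  | nil => intro x y; simp [chainLen]
  | cons z zs ih =>
    intro x y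
    simp only [List.cons_append, chainLen, List.all_cons, Bool.and_eq_true, decide_eq_true_eq]
    by_cases hz : z = x
    · subst hz
      rw [if_pos rfl, if_pos rfl, ih z y]
      split_ifs with h1 h2 h3
      · simp only [List.length_cons]; push_cast; ring
      · exact absurd ⟨⟨rfl, h1.1⟩, h1.2⟩ h2
      · exact absurd ⟨h3.1.2, h3.2⟩ h1
      · rfl
    · rw [if_neg hz, if_neg hz, if_neg (by rintro ⟨⟨h, _⟩, _⟩; exact hz h)]

theorem tc_reverse (l : List Int) : ∀ (x : Int) (xs : List Int),
    l.reverse = x :: xs → 1 + chainLen x xs = tc l := by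
  induction l with
  | nil => intro x xs h; simp at h
  | cons y ys ih =>
    intro x xs h
    rw [List.reverse_cons] at h
    rcases hys : ys.reverse with _ | ⟨x', xs'⟩
    · rw [hys] at h
      have hnil : ys = [] := by simpa using congrArg List.reverse hys
      subst hnil
      simp only [List.nil_append, List.cons.injEq] at h
      obtain ⟨rfl, rfl⟩ := h
      simp [tc, chainLen]
    · rw [hys, List.cons_append] at h
      obtain ⟨rfl, rfl⟩ : x' = x ∧ xs' ++ [y] = xs := by
        cases h; exact ⟨rfl, rfl⟩
      have hy : ys = xs'.reverse ++ [x'] := by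
        have := congrArg List.reverse hys; simpa using this
      rw [chainLen_append]
      have hlen : (ys.length : Int) = (xs'.length : Int) + 1 := by
        rw [hy]; simp
      have hiff : (ys.all (· = y) = true) ↔ (xs'.all (· = x') = true ∧ y = x') := by
        subst hy
        simp only [List.all_append, List.all_reverse, List.all_cons, List.all_nil,
          Bool.and_true, Bool.and_eq_true, decide_eq_true_eq]
        constructor
        · rintro ⟨ha, rfl⟩; exact ⟨ha, rfl⟩
        · rintro ⟨ha, rfl⟩; exact ⟨ha, rfl⟩
      show 1 + _ = tc (y :: ys)
      rw [tc]
      by_cases hC : (xs'.all (· = x') = true ∧ y = x')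
      · rw [if_pos hC, if_pos (hiff.mpr hC), hlen]
      · rw [if_neg hC, if_neg (fun hh => hC (hiff.mp hh))]
        exact ih x' xs' hys

theorem groupGo_ne_nil (xs : List Int) : ∀ (x n : Int), groupGo x n xs ≠ [] := by
  induction xs with
  | nil => intro x n; simp [groupGo]
  | cons y ys ih =>
    intro x n
    rw [groupGo]
    split_ifs with h
    · exact ih x (n + 1)
    · simp

theorem groupGo_getLast (xs : List Int) : ∀ (x n : Int),
    (groupGo x n xs).getLast? = some (if xs.all (· = x) then n + (xs.length : Int) else tc xs) := by
  induction xs with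
  | nil => intro x n; simp [groupGo]
  | cons y ys ih =>
    intro x n
    rw [groupGo]
    by_cases h : y = x
    · rw [if_pos h, ih x (n + 1)]
      subst h
      have hc : ((y :: ys).all (· = y)) = (ys.all (· = y)) := by simp
      rw [hc]
      by_cases hall : ys.all (· = y) = true
      · rw [if_pos hall, if_pos hall]
        simp only [List.length_cons]
        push_cast
        congr 1
        ring
      · rw [if_neg hall, if_neg hall]
        congr 1
        conv_rhs => rw [tc, if_neg hall]
    · rw [if_neg h]
      obtain ⟨a, as, he⟩ : ∃ a as, groupGo y 1 ys = a :: as := by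
        rcases hg : groupGo y 1 ys with _ | ⟨a, as⟩
        · exact absurd hg (groupGo_ne_nil ys y 1)
        · exact ⟨a, as, rfl⟩
      have hgl : groupLengths (y :: ys) = groupGo y 1 ys := by rw [groupLengths]
      rw [hgl, he, List.getLast?_cons_cons, ← he, ih y 1]
      have hfalse : ¬((y :: ys).all (· = x) = true) := by simp [h]
      conv_rhs => rw [if_neg hfalse, tc]

-- ===== VERDICT (by name: the statement is the Claim_ definition above) =====
theorem getMoveCount_spec : Claim_equal_getMoveCount := by
  intro moves _
  unfold Spec_getMoveCount getMoveCount getMoveCount_alt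
  rw [PySem.List.slice?_none_none_neg_one]
  simp only [Option.getD_some]
  cases moves with
  | nil => simp [groupLengths, getMoveCountLoop]
  | cons y ys =>
    -- A side: the reversed list is nonempty
    rcases hr : (y :: ys).reverse with _ | ⟨x, xs⟩
    · exact absurd hr (by simp)
    · rw [loopA_eq xs x 1 (by omega), tc_reverse (y :: ys) x xs hr]
      -- B side
      have hgl : groupLengths (y :: ys) = groupGo y 1 ys := by rw [groupLengths]
      rw [hgl, groupGo_getLast ys y 1]
      conv_lhs => rw [tc]
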